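-- pv_equiv track=rewrite | github.com/bryanforbes/pyuca | pyuca/collator.py | sort_key_from_collation_elements
-- ===== SOURCE A (Python) =====
-- def sort_key_from_collation_elements(collation_elements):
--     sort_key = []
--
--     for level in range(4):
--         if level:
--             sort_key.append(0)  # level separator
--         for element in collation_elements:
--             if len(element) > level:
--                 ce_l = element[level]
--                 if ce_l:
--                     sort_key.append(ce_l)
--
--     return tuple(sort_key)
-- ===== SOURCE B (Python) =====
-- def sort_key_from_collation_elements(collation_elements):
--     l0, l1, l2, l3 = [], [], [], []
--     for e in collation_elements:
--         n = len(e)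
--         if n > 0 and e[0]:
--             l0.append(e[0])
--         if n > 1 and e[1]:
--             l1.append(e[1])
--         if n > 2 and e[2]:
--             l2.append(e[2])
--         if n > 3 and e[3]:
--             l3.append(e[3])
--     return tuple(l0 + [0] + l1 + [0] + l2 + [0] + l3)
-- ===== Notes on version B (the rewrite author's own statement) =====
-- stated objective: alternative
-- what changed: Replaces A's four repeated scans of the input (one per level, appending into one growing key) by a single pass that fills four per-level buckets and then assembles the key with unconditional separators.
import Mathlib
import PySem

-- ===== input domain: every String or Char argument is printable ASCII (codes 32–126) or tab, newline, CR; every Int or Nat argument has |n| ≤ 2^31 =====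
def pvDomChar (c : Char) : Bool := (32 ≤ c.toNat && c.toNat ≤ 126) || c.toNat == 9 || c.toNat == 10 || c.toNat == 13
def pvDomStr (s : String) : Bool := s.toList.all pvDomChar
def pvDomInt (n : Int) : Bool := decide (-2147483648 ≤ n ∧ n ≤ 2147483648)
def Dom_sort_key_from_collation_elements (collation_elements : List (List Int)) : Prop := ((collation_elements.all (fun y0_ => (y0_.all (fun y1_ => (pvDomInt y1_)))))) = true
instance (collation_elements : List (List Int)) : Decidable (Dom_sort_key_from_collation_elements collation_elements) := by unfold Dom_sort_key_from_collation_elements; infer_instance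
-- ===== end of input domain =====

-- B makes a single pass filling four per-level buckets instead of A's four scans, then assembles the key; objective: alternative decomposition, same cost.

-- ===== PORT A =====
-- inner loop of A ('for element in collation_elements: …') as a named helper
def pvInner (level : Nat) (collation_elements : List (List Int)) (sk : List Int) : List Int :=
  collation_elements.foldl (fun sort_key element =>
    if element.length > level then
      let ce_l := element.getD level 0   -- element[level]; in range by the guard
      if ce_l ≠ 0 then sort_key ++ [ce_l] else sort_key
    else sort_key) sk

-- four passes over the input, one per level, appending into one growing sort_key
def sort_key_from_collation_elements (collation_elements : List (List Int)) : List Int :=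
  (List.range 4).foldl (fun sort_key level =>
    let sort_key := if level ≠ 0 then sort_key ++ [0] else sort_key
    pvInner level collation_elements sort_key) []

-- ===== PORT B =====
-- loop body of B: apply an element's four conditional bucket updates
def pvStepFun (ls : List Int × List Int × List Int × List Int) (e : List Int) :
    List Int × List Int × List Int × List Int :=
  let n := e.length
  let l0 := if n > 0 ∧ e.getD 0 0 ≠ 0 then ls.1 ++ [e.getD 0 0] else ls.1
  let l1 := if n > 1 ∧ e.getD 1 0 ≠ 0 then ls.2.1 ++ [e.getD 1 0] else ls.2.1
  let l2 := if n > 2 ∧ e.getD 2 0 ≠ 0 then ls.2.2.1 ++ [e.getD 2 0] else ls.2.2.1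
  let l3 := if n > 3 ∧ e.getD 3 0 ≠ 0 then ls.2.2.2 ++ [e.getD 3 0] else ls.2.2.2
  (l0, l1, l2, l3)

-- one pass filling four buckets, then a fixed-shape assembly with unconditional separators
def sort_key_from_collation_elements_alt (collation_elements : List (List Int)) : List Int :=
  let ls := collation_elements.foldl pvStepFun ([], [], [], [])
  ls.1 ++ [0] ++ ls.2.1 ++ [0] ++ ls.2.2.1 ++ [0] ++ ls.2.2.2

-- ===== PRECONDITION & SPEC =====
def Spec_sort_key_from_collation_elements (collation_elements : List (List Int)) (out : List Int) : Prop := out = sort_key_from_collation_elements_alt collation_elements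
instance (collation_elements : List (List Int)) (out : List Int) : Decidable (Spec_sort_key_from_collation_elements collation_elements out) := by unfold Spec_sort_key_from_collation_elements; infer_instance

-- ===== CLAIM (what is proved, stated in full; the proofs are below) =====
def Claim_equal_sort_key_from_collation_elements : Prop := ∀ (collation_elements : List (List Int)), Dom_sort_key_from_collation_elements collation_elements → Spec_sort_key_from_collation_elements collation_elements (sort_key_from_collation_elements collation_elements)

-- ===== LEMMAS AND PROOFS =====

-- the entries an element contributes at level l
def pvContrib (l : Nat) (e : List Int) : List Int :=
  if e.length > l ∧ e.getD l 0 ≠ 0 then [e.getD l 0] else []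

-- the entries contributed at a given level, over the whole list
def pvBucket (l : Nat) (ces : List (List Int)) : List Int := ces.flatMap (pvContrib l)

theorem pvBucket_nil (l : Nat) : pvBucket l [] = [] := rfl

theorem pvBucket_cons (l : Nat) (e : List Int) (t : List (List Int)) :
    pvBucket l (e :: t) = pvContrib l e ++ pvBucket l t := by
  simp [pvBucket]

theorem pvInnerA (l : Nat) (ces : List (List Int)) (acc : List Int) :
    pvInner l ces acc = acc ++ pvBucket l ces := by
  unfold pvInner
  have h : (fun (sk : List Int) (e : List Int) =>
      if e.length > l then
        let ce_l := e.getD l 0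
        if ce_l ≠ 0 then sk ++ [ce_l] else sk
      else sk)
      = fun sk e => sk ++ pvContrib l e := by
    funext sk e
    by_cases h1 : e.length > l <;> simp [pvContrib, h1]
    split_ifs <;> simp
  rw [h, PySem.List.foldl_append_eq_flatMap]
  rfl

theorem pvContrib_append (l : Nat) (e : List Int) (b : List Int) :
    (if e.length > l ∧ e.getD l 0 ≠ 0 then b ++ [e.getD l 0] else b) = b ++ pvContrib l e := by
  unfold pvContrib; split <;> simp

theorem pvStep (e b0 b1 b2 b3 : List Int) :
    pvStepFun (b0, b1, b2, b3) e
    = (b0 ++ pvContrib 0 e, b1 ++ pvContrib 1 e, b2 ++ pvContrib 2 e, b3 ++ pvContrib 3 e) := by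
  simp only [pvStepFun, pvContrib_append]

theorem pvFoldB (ces : List (List Int)) (b0 b1 b2 b3 : List Int) :
    ces.foldl pvStepFun (b0, b1, b2, b3)
    = (b0 ++ pvBucket 0 ces, b1 ++ pvBucket 1 ces, b2 ++ pvBucket 2 ces, b3 ++ pvBucket 3 ces) := by
  induction ces generalizing b0 b1 b2 b3 with
  | nil => simp [pvBucket_nil]
  | cons e t ih =>
      rw [List.foldl_cons, pvStep, ih]
      simp [pvBucket_cons]

-- ===== VERDICT (by name: the statement is the Claim_ definition above) =====
theorem sort_key_from_collation_elements_spec : Claim_equal_sort_key_from_collation_elements := by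
  intro ces _
  show sort_key_from_collation_elements ces = sort_key_from_collation_elements_alt ces
  unfold sort_key_from_collation_elements sort_key_from_collation_elements_alt
  rw [show List.range 4 = [0, 1, 2, 3] from rfl]
  simp only [List.foldl_cons, List.foldl_nil, pvFoldB]
  simp [pvInnerA]
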